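-- pv_equiv track=rewrite | github.com/veinisrate/python_course_rtu | 8th-lecture-3rd-task.py | clean_dict_values
-- ===== SOURCE A (Python) =====
-- def clean_dict_values(d: dict, v_list: list) -> dict:
--     key_list = []
--     for k in d:
--         if d[k] in v_list:
--             key_list.append(k)
--     for k in key_list:
--         d.pop(k)
--     return d
-- ===== SOURCE B (Python) =====
-- def clean_dict_values(d: dict, v_list: list) -> dict:
--     kept = {k: v for k, v in d.items() if v not in v_list}
--     d.clear()
--     d.update(kept)
--     return d
-- ===== Notes on version B (the rewrite author's own statement) =====
-- stated objective: simpler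
-- what changed: Instead of collecting doomed keys and popping them one by one (two passes plus per-key pops), B builds the kept subset with a single filtering comprehension and rebuilds d in place via clear()+update(); both mutate d and return it.
import Mathlib
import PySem

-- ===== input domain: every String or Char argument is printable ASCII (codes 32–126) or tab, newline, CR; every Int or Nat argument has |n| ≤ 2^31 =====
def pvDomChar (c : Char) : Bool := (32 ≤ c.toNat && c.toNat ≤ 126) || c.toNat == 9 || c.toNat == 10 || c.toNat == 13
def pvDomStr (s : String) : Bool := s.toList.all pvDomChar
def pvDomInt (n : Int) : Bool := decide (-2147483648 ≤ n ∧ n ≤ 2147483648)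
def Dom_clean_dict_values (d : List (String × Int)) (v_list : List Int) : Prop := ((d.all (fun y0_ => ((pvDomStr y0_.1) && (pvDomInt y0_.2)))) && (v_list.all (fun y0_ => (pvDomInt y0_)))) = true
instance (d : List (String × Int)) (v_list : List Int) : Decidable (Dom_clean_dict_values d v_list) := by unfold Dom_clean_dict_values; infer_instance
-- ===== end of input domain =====

-- ===== PORT A =====
-- B rebuilds `d` in place (clear+update) where A pops keys from it; the return value is what is proved equal.

-- `d.pop(k)`: remove the first pair with key k (a Python dict has at most one).
def popFirst : List (String × Int) → String → List (String × Int)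
  | [], _ => []
  | kv :: rest, k => if kv.1 == k then rest else kv :: popFirst rest k

def clean_dict_values (d : List (String × Int)) (v_list : List Int) : List (String × Int) :=
  -- key_list = []; for k in d: if d[k] in v_list: key_list.append(k)
  -- `d[k]` is the first-match lookup; k comes from d's keys so it always succeeds (getD default unreachable)
  let key_list := (d.map Prod.fst).foldl
    (fun acc k => if v_list.contains ((List.lookup k d).getD 0) then acc ++ [k] else acc) []
  -- for k in key_list: d.pop(k)
  key_list.foldl popFirst d

-- ===== PORT B =====
def clean_dict_values_alt (d : List (String × Int)) (v_list : List Int) : List (String × Int) :=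
  -- kept = {k: v for k, v in d.items() if v not in v_list}; d.clear(); d.update(kept); return d
  let kept := d.filter (fun kv => !(v_list.contains kv.2))
  [] ++ kept

-- ===== PRECONDITION & SPEC =====
-- Pre_ excludes association lists with duplicate keys: they do not represent any Python dict
-- (a Python dict argument always has unique keys), so A's behaviour there is not defined by the source.
def Pre_clean_dict_values (d : List (String × Int)) (_v_list : List Int) : Prop :=
  (d.map Prod.fst).Nodup
instance (d : List (String × Int)) (v_list : List Int) : Decidable (Pre_clean_dict_values d v_list) := by unfold Pre_clean_dict_values; infer_instance
def pvWitness_clean_dict_values : (List (String × Int)) × List Int := ([("a", 1), ("b", 2)], [2, 3])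
-- Spec:
def Spec_clean_dict_values (d : List (String × Int)) (v_list : List Int) (out : List (String × Int)) : Prop := out = clean_dict_values_alt d v_list
instance (d : List (String × Int)) (v_list : List Int) (out : List (String × Int)) : Decidable (Spec_clean_dict_values d v_list out) := by unfold Spec_clean_dict_values; infer_instance

-- ===== CLAIM (what is proved, stated in full; the proofs are below) =====
def Claim_equal_clean_dict_values : Prop := ∀ (d : List (String × Int)) (v_list : List Int), Dom_clean_dict_values d v_list → Pre_clean_dict_values d v_list → Spec_clean_dict_values d v_list (clean_dict_values d v_list)

-- ===== LEMMAS AND PROOFS =====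

theorem popFirst_eq_filter (d : List (String × Int)) (k : String)
    (h : (d.map Prod.fst).Nodup) :
    popFirst d k = d.filter (fun kv => !(kv.1 == k)) := by
  induction d with
  | nil => rfl
  | cons kv rest ih =>
    simp only [List.map_cons, List.nodup_cons, List.mem_map] at h
    simp only [popFirst, List.filter_cons]
    by_cases hk : kv.1 == k
    · simp only [hk, if_true, Bool.not_true, Bool.false_eq_true, if_false]
      have : ∀ x ∈ rest, (!(x.1 == k)) = true := by
        intro x hx
        simp only [beq_iff_eq] at hk ⊢
        simp only [Bool.not_eq_true', beq_eq_false_iff_ne, ne_eq]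
        intro hxk
        exact h.1 ⟨x, hx, by rw [hxk, ← hk]⟩
      rw [List.filter_eq_self.mpr this]
    · simp only [hk]
      simp [ih h.2]

theorem foldl_popFirst_eq_filter (ks : List String) (d : List (String × Int))
    (h : (d.map Prod.fst).Nodup) :
    ks.foldl popFirst d = d.filter (fun kv => !(ks.contains kv.1)) := by
  induction ks generalizing d with
  | nil => simp
  | cons k ks ih =>
    simp only [List.foldl_cons]
    rw [popFirst_eq_filter d k h]
    have hnd : ((d.filter (fun kv => !(kv.1 == k))).map Prod.fst).Nodup :=
      (List.Sublist.map Prod.fst List.filter_sublist).nodup h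
    rw [ih _ hnd, List.filter_filter]
    apply List.filter_congr
    intro kv _
    simp only [List.contains_cons]
    cases hkk : kv.1 == k <;> simp

theorem lookup_of_mem_nodup (d : List (String × Int)) (kv : String × Int)
    (hnd : (d.map Prod.fst).Nodup) (hmem0 : kv ∈ d) : List.lookup kv.1 d = some kv.2 := by
  induction d with
  | nil => cases hmem0
  | cons a rest ih =>
    simp only [List.map_cons, List.nodup_cons] at hnd
    rcases List.mem_cons.mp hmem0 with rfl | hmem
    · simp [List.lookup]
    · have hne : kv.1 ≠ a.1 := by
        intro he
        exact hnd.1 (he ▸ List.mem_map.mpr ⟨kv, hmem, rfl⟩)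
      simp only [List.lookup, beq_eq_false_iff_ne.mpr hne]
      exact ih hnd.2 hmem

theorem keyList_eq (d0 d : List (String × Int)) (v_list : List Int)
    (h : (d0.map Prod.fst).Nodup) (hsub : ∀ kv ∈ d, List.lookup kv.1 d0 = some kv.2)
    (hnd : (d.map Prod.fst).Nodup) :
    (d.map Prod.fst).filter (fun k => v_list.contains ((List.lookup k d0).getD 0))
      = (d.filter (fun kv => v_list.contains kv.2)).map Prod.fst := by
  induction d with
  | nil => rfl
  | cons kv rest ih =>
    simp only [List.map_cons, List.filter_cons]
    rw [hsub kv (List.mem_cons_self)]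
    simp only [Option.getD_some]
    simp only [List.map_cons, List.nodup_cons] at hnd
    have hrest := ih (fun x hx => hsub x (List.mem_cons_of_mem _ hx)) hnd.2
    split
    · simp only [List.map_cons]; rw [hrest]
    · exact hrest

-- ===== VERDICT (by name: the statement is the Claim_ definition above) =====
theorem clean_dict_values_spec : Claim_equal_clean_dict_values := by
  intro d v_list _ hpre
  unfold Spec_clean_dict_values clean_dict_values clean_dict_values_alt
  simp only [List.nil_append]
  rw [PySem.List.foldl_append_if_eq_filter, List.nil_append]
  rw [keyList_eq d d v_list hpre (fun kv hkv => lookup_of_mem_nodup d kv hpre hkv) hpre]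
  rw [foldl_popFirst_eq_filter _ d hpre]
  apply List.filter_congr
  intro kv hkv
  simp only [Bool.not_inj_iff, List.contains_eq_mem, decide_eq_decide]
  constructor
  · intro hmem
    obtain ⟨w, hw, hww⟩ := List.mem_map.mp hmem
    have hwf := List.mem_filter.mp hw
    have hwkv : w = kv := List.inj_on_of_nodup_map hpre hwf.1 hkv hww
    have := hwf.2
    rw [hwkv] at this
    simpa using this
  · intro hv
    exact List.mem_map.mpr ⟨kv, List.mem_filter.mpr ⟨hkv, by simpa using hv⟩, rfl⟩
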